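-- pv_equiv track=rewrite | github.com/materialsproject/pymatgen | pymatgen/io/adf.py | iterlines
-- ===== SOURCE A (Python) =====
-- from typing import Generator
--
-- def iterlines(s: str) -> Generator[str, None, None]:
--     r"""A generator form of s.split('\n') for reducing memory overhead.
--
--     Args:
--         s (str): A multi-line string.
--
--     Yields:
--         str: line
--     """
--     prevnl = -1
--     while True:
--         nextnl = s.find("\n", prevnl + 1)
--         if nextnl < 0:
--             yield s[(prevnl + 1) :]
--             break
--         yield s[(prevnl + 1) : nextnl]
--         prevnl = nextnl
-- ===== SOURCE B (Python) =====
-- def iterlines(s: str):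
--     """A generator form of s.split('\n')."""
--     for line in s.split("\n"):
--         yield line
-- ===== Notes on version B (the rewrite author's own statement) =====
-- stated objective: simpler
-- what changed: Replaces the manual prevnl/nextnl find-and-slice streaming loop with a single call to the built-in s.split("\n") and yields its elements.
import Mathlib
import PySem

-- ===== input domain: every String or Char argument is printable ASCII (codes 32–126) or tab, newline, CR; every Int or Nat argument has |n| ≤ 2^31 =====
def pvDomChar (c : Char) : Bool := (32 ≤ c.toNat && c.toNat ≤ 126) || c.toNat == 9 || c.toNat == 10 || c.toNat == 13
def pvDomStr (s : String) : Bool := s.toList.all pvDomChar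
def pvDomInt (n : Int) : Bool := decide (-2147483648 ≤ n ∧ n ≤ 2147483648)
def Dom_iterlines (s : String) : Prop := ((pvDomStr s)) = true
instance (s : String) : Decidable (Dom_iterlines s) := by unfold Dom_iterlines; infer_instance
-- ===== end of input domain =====

-- B replaces A's manual find/slice streaming loop by the built-in s.split("\n"); objective: simpler.
-- (A is a generator; the equivalence is about the sequence of yielded lines, i.e. list(iterlines(s)).)

-- ===== PORT A =====
-- The while-loop, one fuel tick per iteration; fuel s.length + 1 always suffices
-- (each iteration moves prevnl strictly forward), so the 0-fuel branch is unreachable.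
def iterlinesLoop (s : String) : Nat → Int → List String
  | 0, _ => []
  | fuel + 1, prevnl =>
    let nextnl := PySem.Str.findFrom s "\n" (prevnl + 1)
    if nextnl < 0 then
      [PySem.Str.slice s (some (prevnl + 1)) none]
    else
      PySem.Str.slice s (some (prevnl + 1)) (some nextnl) :: iterlinesLoop s fuel nextnl

def iterlines (s : String) : List String := iterlinesLoop s (s.toList.length + 1) (-1)

-- ===== PORT B =====
-- Source B is a single call to the standard library's s.split("\n") (single-char separator),
-- ported as Mathlib's List.splitOn on the code points.
def iterlines_alt (s : String) : List String :=
  (s.toList.splitOn '\n').map (fun l => String.ofList l)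

-- ===== PRECONDITION & SPEC =====
def Spec_iterlines (s : String) (out : List String) : Prop := out = iterlines_alt s
instance (s : String) (out : List String) : Decidable (Spec_iterlines s out) := by unfold Spec_iterlines; infer_instance

-- ===== CLAIM (what is proved, stated in full; the proofs are below) =====
def Claim_equal_iterlines : Prop := ∀ (s : String), Dom_iterlines s → Spec_iterlines s (iterlines s)

-- ===== LEMMAS AND PROOFS =====

lemma pv_loopA_eq (s : String) (m : Nat) :
    ∀ (p : Nat), s.toList.length - p < m → p ≤ s.toList.length →
      iterlinesLoop s m ((p : Int) - 1) =
        ((s.toList.drop p).splitOn '\n').map (fun l => String.ofList l) := by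
  induction m with
  | zero => intro p h _; omega
  | succ m ih =>
    intro p hm hp
    simp only [iterlinesLoop]
    have harg : (p : Int) - 1 + 1 = (p : Int) := by ring
    rw [harg]
    simp only [PySem.Str.findFrom_eq]
    rw [PySem.Chars.findFrom_natCast s.toList "\n".toList p hp]
    set t : List Char := s.toList.drop p with ht
    by_cases hfind : PySem.Chars.find t "\n".toList = -1
    · -- no further newline: the loop yields the final piece
      rw [if_pos hfind, if_pos (by norm_num : (-1 : Int) < 0)]
      have hnotin : '\n' ∉ t := by
        rw [PySem.Chars.find_eq_neg_one_iff] at hfind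
        intro hmem
        exact hfind ((List.singleton_infix_iff '\n' t).mpr hmem)
      have hsingle : t.splitOn '\n' = [t] :=
        List.splitOnP_eq_single _ _ (by
          intro x hx
          simp only [beq_iff_eq]
          intro heq; exact hnotin (heq ▸ hx))
      rw [hsingle]
      have hsl : PySem.Str.slice s (some (p : Int)) none = String.ofList t := by
        have : (PySem.Str.slice s (some (p : Int)) none).toList = t := by
          rw [PySem.Str.toList_slice, PySem.Chars.slice_eq_listSlice,
            PySem.List.slice_from s.toList (by positivity : (0:Int) ≤ (p:Int))]
          simp [ht]
        rw [← this, String.ofList_toList]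
      simp [hsl]
    · -- a newline at offset k of t: yield the segment and continue after it
      have hge : -1 ≤ PySem.Chars.find t "\n".toList := PySem.Chars.neg_one_le_find _ _
      have hf0 : 0 ≤ PySem.Chars.find t "\n".toList := by omega
      obtain ⟨hpre, hmin⟩ := PySem.Chars.find_spec (s := t) (sub := "\n".toList) hf0
      set k : Nat := (PySem.Chars.find t "\n".toList).toNat with hk
      have hknl : t.drop k = '\n' :: t.drop (k + 1) := by
        obtain ⟨r, hr⟩ := hpre
        have : "\n".toList = ['\n'] := by decide
        rw [this] at hr
        rw [← hr]
        have : t.drop (k + 1) = (t.drop k).tail := by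
          rw [List.tail_drop]
        rw [this, ← hr]
        rfl
      have hklt : k < t.length := by
        by_contra hc
        rw [List.drop_eq_nil_of_le (by omega)] at hknl
        exact absurd hknl (by simp)
      have htlen : t.length = s.toList.length - p := by rw [ht, List.length_drop]
      have hnotin : ∀ x ∈ t.take k, ¬ (x == '\n') = true := by
        intro x hx hbe
        rw [beq_iff_eq] at hbe
        subst hbe
        obtain ⟨i, hi, hget⟩ := List.mem_take_iff_getElem.mp hx
        have hilt : i < t.length := by omega
        have hidrop : t.drop i = t[i] :: t.drop (i + 1) :=
          (List.getElem_cons_drop hilt).symm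
        rw [hget] at hidrop
        have := hmin i (by omega)
        apply this
        rw [hidrop]
        have : "\n".toList = ['\n'] := by decide
        rw [this]
        exact ⟨t.drop (i + 1), rfl⟩
      have hdecomp : t = t.take k ++ '\n' :: t.drop (k + 1) := by
        conv_lhs => rw [← List.take_append_drop k t]
        rw [hknl]
      have hfk : PySem.Chars.find t "\n".toList = (k : Int) := by omega
      have hnneg : ¬ ((p : Int) + (k : Int) < 0) := by omega
      rw [if_neg hfind, hfk, if_neg hnneg]
      -- head segment
      have hsl : PySem.Str.slice s (some (p : Int)) (some ((p : Int) + (k : Int))) =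
          String.ofList (t.take k) := by
        have : (PySem.Str.slice s (some (p : Int)) (some ((p : Int) + (k : Int)))).toList
            = t.take k := by
          rw [PySem.Str.toList_slice, PySem.Chars.slice_eq_listSlice,
            PySem.List.slice_natCast_add s.toList p k, ht]
        rw [← this, String.ofList_toList]
      -- recursive call
      have harg2 : (p : Int) + (k : Int) = ((p + k + 1 : Nat) : Int) - 1 := by push_cast; ring
      rw [harg2, ih (p + k + 1) (by omega) (by omega)]
      have hdrop : s.toList.drop (p + k + 1) = t.drop (k + 1) := by
        rw [ht, List.drop_drop]
        congr 1
      rw [hdrop]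
      conv_rhs => rw [hdecomp]
      simp only [List.splitOn]
      rw [List.splitOnP_first _ _ hnotin '\n' (by simp) _, ← harg2, hsl]
      simp

-- ===== VERDICT (by name: the statement is the Claim_ definition above) =====
theorem iterlines_spec : Claim_equal_iterlines := by
  intro s _
  unfold Spec_iterlines iterlines iterlines_alt
  have : (-1 : Int) = ((0 : Nat) : Int) - 1 := by norm_num
  rw [this, pv_loopA_eq s (s.toList.length + 1) 0 (by omega) (by omega)]
  simp
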